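-- pv_equiv track=rewrite | github.com/PreferredNerd/CMPSC132 | Joined List; Remove Punctuation.py | joinedList
-- ===== SOURCE A (Python) =====
-- def joinedList(n):
--     outputArray = []
--     if type(n) == int:
--         if n > 0:
--             for currentNumber in range(n):
--                 outputArray.append(currentNumber+1)
--             for currentNumber in range(n):
--                 outputArray.append(n-currentNumber)
--         elif n < 0:
--             for currentNumber in range(n*-1):
--                 outputArray.append(n+currentNumber)
--             for currentNumber in range(n*-1):
--                 outputArray.append(-1*(currentNumber)-1)
--         return outputArray
--     else:
--         return "error"
-- ===== SOURCE B (Python) =====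
-- def joinedList(n):
--     if type(n) != int:
--         return "error"
--     if n == 0:
--         return []
--     half = list(range(1, n + 1)) if n > 0 else list(range(n, 0))
--     return half + half[::-1]
-- ===== Notes on version B (the rewrite author's own statement) =====
-- stated objective: simpler
-- what changed: B builds only the ascending first half once (range(1,n+1) or range(n,0)) and returns half + half[::-1], replacing A's four separate per-sign append loops with a single construction plus a reflection.
import Mathlib
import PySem

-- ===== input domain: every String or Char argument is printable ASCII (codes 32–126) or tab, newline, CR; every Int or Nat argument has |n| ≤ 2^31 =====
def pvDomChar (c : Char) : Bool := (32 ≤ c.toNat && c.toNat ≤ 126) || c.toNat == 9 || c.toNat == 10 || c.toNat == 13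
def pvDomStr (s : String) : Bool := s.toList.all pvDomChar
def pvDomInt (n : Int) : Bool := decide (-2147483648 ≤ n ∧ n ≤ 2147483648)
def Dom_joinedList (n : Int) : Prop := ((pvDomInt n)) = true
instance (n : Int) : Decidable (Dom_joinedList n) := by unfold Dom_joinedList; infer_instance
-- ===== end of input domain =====

-- B builds only the ascending first half once and returns half ++ half.reverse,
-- replacing A's four per-sign append loops with one construction plus a reflection (objective: simpler).

-- ===== PORT A =====
def joinedList (n : Int) : List Int :=
  if n > 0 then
    let out1 := (PySem.List.pyRange 0 n 1).foldl (fun acc c => acc ++ [c + 1]) []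
    (PySem.List.pyRange 0 n 1).foldl (fun acc c => acc ++ [n - c]) out1
  else if n < 0 then
    let out1 := (PySem.List.pyRange 0 (n * -1) 1).foldl (fun acc c => acc ++ [n + c]) []
    (PySem.List.pyRange 0 (n * -1) 1).foldl (fun acc c => acc ++ [-1 * c - 1]) out1
  else []

-- ===== PORT B =====
def joinedList_alt (n : Int) : List Int :=
  if n = 0 then []
  else
    let half := if n > 0 then PySem.List.pyRange 1 (n + 1) 1 else PySem.List.pyRange n 0 1
    half ++ half.reverse

-- ===== PRECONDITION & SPEC =====
def Spec_joinedList (n : Int) (out : List Int) : Prop := out = joinedList_alt n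
instance (n : Int) (out : List Int) : Decidable (Spec_joinedList n out) := by unfold Spec_joinedList; infer_instance

-- ===== CLAIM (what is proved, stated in full; the proofs are below) =====
def Claim_equal_joinedList : Prop := ∀ (n : Int), Dom_joinedList n → Spec_joinedList n (joinedList n)

-- ===== LEMMAS AND PROOFS =====

theorem pvFoldlApp (f : Int → Int) : ∀ (l init : List Int),
    l.foldl (fun acc c => acc ++ [f c]) init = init ++ l.map f := by
  intro l
  induction l with
  | nil => simp
  | cons x xs ih => intro init; simp [List.foldl, ih]

-- descending map over range m equals the reverse of an ascending map
theorem pvRevKey : ∀ (m : Nat) (a : Int),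
    (List.range m).map (fun k : Nat => a - (k : Int) - 1)
      = ((List.range m).map (fun k : Nat => (k : Int) + (a - m))).reverse := by
  intro m
  induction m with
  | zero => intro a; simp
  | succ m ih =>
    intro a
    conv_lhs => rw [List.range_succ_eq_map]
    conv_rhs => rw [List.range_succ]
    simp only [List.map_cons, List.map_map, List.map_append, List.map_nil,
      List.reverse_append, List.reverse_cons, List.reverse_nil, List.nil_append,
      List.cons_append]
    refine List.cons_eq_cons.mpr ⟨by push_cast; ring, ?_⟩
    have l1 : List.map ((fun k : Nat => a - (k : Int) - 1) ∘ Nat.succ) (List.range m)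
        = List.map (fun k : Nat => (a - 1) - (k : Int) - 1) (List.range m) :=
      List.map_congr_left (fun k _ => by simp only [Function.comp_apply]; push_cast; ring)
    have l2 : List.map (fun k : Nat => (k : Int) + (a - ((m : Nat) + 1 : Nat)))
          (List.range m)
        = List.map (fun k : Nat => (k : Int) + ((a - 1) - m)) (List.range m) :=
      List.map_congr_left (fun k _ => by push_cast; ring)
    rw [l1, ih (a - 1), ← l2]

theorem joinedList_eq_alt (n : Int) : joinedList n = joinedList_alt n := by
  rcases lt_trichotomy n 0 with hneg | hz | hpos
  · -- n < 0
    simp only [joinedList, joinedList_alt, if_neg (by omega : ¬ n > 0),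
      if_pos hneg, if_neg (by omega : ¬ n = 0), pvFoldlApp,
      PySem.List.pyRange_one, List.nil_append, List.map_map]
    rw [show (n * -1 - 0) = (0 - n) by ring]
    have hmn : (((0 - n).toNat : Nat) : Int) = -n := by omega
    have l1 : List.map ((fun c : Int => n + c) ∘ fun k : Nat => 0 + (k : Int))
          (List.range (0 - n).toNat)
        = List.map (fun k : Nat => n + (k : Int)) (List.range (0 - n).toNat) :=
      List.map_congr_left (fun k _ => by simp)
    have l2 : List.map ((fun c : Int => -1 * c - 1) ∘ fun k : Nat => 0 + (k : Int))
          (List.range (0 - n).toNat)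
        = List.map (fun k : Nat => (0 : Int) - (k : Int) - 1) (List.range (0 - n).toNat) :=
      List.map_congr_left (fun k _ => by simp only [Function.comp_apply]; ring)
    have l3 : List.map (fun k : Nat => (k : Int) + ((0 : Int) - ((0 - n).toNat : Int)))
          (List.range (0 - n).toNat)
        = List.map (fun k : Nat => n + (k : Int)) (List.range (0 - n).toNat) :=
      List.map_congr_left (fun k _ => by rw [hmn]; ring)
    rw [l1, l2, pvRevKey (0 - n).toNat 0, l3]
  · simp [joinedList, joinedList_alt, hz]
  · -- n > 0
    simp only [joinedList, joinedList_alt, if_pos hpos,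
      if_neg (by omega : ¬ n = 0), pvFoldlApp,
      PySem.List.pyRange_one, List.nil_append, List.map_map]
    rw [show (n - 0) = n by ring, show (n + 1 - 1) = n by ring]
    have hmn : ((n.toNat : Nat) : Int) = n := by omega
    have l1 : List.map ((fun c : Int => c + 1) ∘ fun k : Nat => 0 + (k : Int))
          (List.range n.toNat)
        = List.map (fun k : Nat => (1 : Int) + (k : Int)) (List.range n.toNat) :=
      List.map_congr_left (fun k _ => by simp only [Function.comp_apply]; ring)
    have l2 : List.map ((fun c : Int => n - c) ∘ fun k : Nat => 0 + (k : Int))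
          (List.range n.toNat)
        = List.map (fun k : Nat => (n + 1) - (k : Int) - 1) (List.range n.toNat) :=
      List.map_congr_left (fun k _ => by simp only [Function.comp_apply]; ring)
    have l3 : List.map (fun k : Nat => (k : Int) + ((n + 1) - ((n.toNat : Nat) : Int)))
          (List.range n.toNat)
        = List.map (fun k : Nat => (1 : Int) + (k : Int)) (List.range n.toNat) :=
      List.map_congr_left (fun k _ => by rw [hmn]; ring)
    rw [l1, l2, pvRevKey n.toNat (n + 1), l3]

-- ===== VERDICT (by name: the statement is the Claim_ definition above) =====
theorem joinedList_spec : Claim_equal_joinedList := by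
  intro n _
  unfold Spec_joinedList
  exact joinedList_eq_alt n
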